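-- pv_equiv track=rewrite | github.com/NoamSmilovich/InvertedIndex | build_tfidf_index.py | build_max_tf_by_doc_dict
-- ===== SOURCE A (Python) =====
-- def build_max_tf_by_doc_dict(inverted_index):
--     max_tf_by_doc = {}
--     for word, doc_counts in inverted_index.items():
--         for doc_id, count in doc_counts.items():
--             if doc_id not in max_tf_by_doc:
--                 max_tf_by_doc[doc_id] = count
--             else:
--                 max_tf_by_doc[doc_id] = max(max_tf_by_doc[doc_id], count)
--     return max_tf_by_doc
-- ===== SOURCE B (Python) =====
-- def build_max_tf_by_doc_dict(inverted_index):
--     # two-phase group-then-reduce: collect every count per doc, then take the max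
--     grouped = {}
--     for word, doc_counts in inverted_index.items():
--         for doc_id, count in doc_counts.items():
--             grouped.setdefault(doc_id, []).append(count)
--     return {doc_id: max(counts) for doc_id, counts in grouped.items()}
-- ===== Notes on version B (the rewrite author's own statement) =====
-- stated objective: alternative
-- what changed: Replaces A's running-max accumulator dict with a two-phase group-then-reduce: one pass collects all counts per doc_id into lists, a second pass maps max over the grouped lists.
import Mathlib
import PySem

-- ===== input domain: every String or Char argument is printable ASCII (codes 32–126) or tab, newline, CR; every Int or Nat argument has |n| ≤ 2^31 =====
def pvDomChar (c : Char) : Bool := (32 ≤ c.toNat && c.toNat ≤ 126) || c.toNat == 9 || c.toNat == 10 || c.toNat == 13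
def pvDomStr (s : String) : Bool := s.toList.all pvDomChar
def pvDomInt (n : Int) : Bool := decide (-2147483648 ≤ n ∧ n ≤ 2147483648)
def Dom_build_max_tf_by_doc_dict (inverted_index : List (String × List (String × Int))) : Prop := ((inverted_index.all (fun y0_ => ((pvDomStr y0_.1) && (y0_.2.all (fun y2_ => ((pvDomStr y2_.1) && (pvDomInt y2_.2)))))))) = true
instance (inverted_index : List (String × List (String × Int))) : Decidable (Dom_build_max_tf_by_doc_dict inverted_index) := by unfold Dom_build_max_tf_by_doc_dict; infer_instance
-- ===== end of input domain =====

-- B replaces A's running-max accumulator with a two-phase group-then-reduce (collect all counts per doc, then max each list); objective: alternative, same cost.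

-- ===== PORT A =====
-- literal port of A: one dict, running max per doc_id
-- (in the else branch Python reads max_tf_by_doc[doc_id], which is present; getD _ 0 is that value)
def build_max_tf_by_doc_dict (inverted_index : List (String × List (String × Int))) : List (String × Int) :=
  (inverted_index.foldl
    (fun max_tf_by_doc wdc =>
      wdc.2.foldl
        (fun m dc =>
          if m.contains dc.1 = false then
            m.insert dc.1 dc.2
          else
            m.insert dc.1 (max (m.getD dc.1 0) dc.2))
        max_tf_by_doc)
    PySem.Dict.empty).items

-- ===== PORT B =====
-- max(counts) for a nonempty counts list (grouped values are always nonempty; [] is unreachable)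
def pyMaxList : List Int → Int
  | [] => 0
  | c :: rest => rest.foldl max c

def build_max_tf_by_doc_dict_alt (inverted_index : List (String × List (String × Int))) : List (String × Int) :=
  let grouped :=
    inverted_index.foldl
      (fun g wdc =>
        wdc.2.foldl
          (fun g dc => g.modify dc.1 [] (· ++ [dc.2]))  -- grouped.setdefault(doc_id, []).append(count)
          g)
      PySem.Dict.empty
  grouped.items.map (fun p => (p.1, pyMaxList p.2))

-- ===== PRECONDITION & SPEC =====
def Spec_build_max_tf_by_doc_dict (inverted_index : List (String × List (String × Int))) (out : List (String × Int)) : Prop := out = build_max_tf_by_doc_dict_alt inverted_index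
instance (inverted_index : List (String × List (String × Int))) (out : List (String × Int)) : Decidable (Spec_build_max_tf_by_doc_dict inverted_index out) := by unfold Spec_build_max_tf_by_doc_dict; infer_instance

-- ===== CLAIM (what is proved, stated in full; the proofs are below) =====
def Claim_equal_build_max_tf_by_doc_dict : Prop := ∀ (inverted_index : List (String × List (String × Int))), Dom_build_max_tf_by_doc_dict inverted_index → Spec_build_max_tf_by_doc_dict inverted_index (build_max_tf_by_doc_dict inverted_index)

-- ===== LEMMAS AND PROOFS =====

-- nested loop over an index = one loop over the flattened postings
theorem pvFoldlFlatMap {α β σ : Type} (l : List α) (h : α → List β) (g : σ → β → σ) (init : σ) :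
    l.foldl (fun s a => (h a).foldl g s) init = (l.flatMap h).foldl g init := by
  induction l generalizing init with
  | nil => rfl
  | cons x xs ih => simp [List.flatMap_cons, List.foldl_append, ih]

-- A's loop body as a single insert
def pvStepA (m : PySem.Dict String Int) (dc : String × Int) : PySem.Dict String Int :=
  m.insert dc.1 (if m.contains dc.1 then max (m.getD dc.1 0) dc.2 else dc.2)

theorem pvStepA_eq :
    (fun (m : PySem.Dict String Int) (dc : String × Int) =>
      if m.contains dc.1 = false then m.insert dc.1 dc.2
      else m.insert dc.1 (max (m.getD dc.1 0) dc.2)) = pvStepA := by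
  funext m dc
  by_cases h : m.contains dc.1 <;> simp [pvStepA, h]

-- running max as an Option-valued fold
def pvAcc (o : Option Int) (c : Int) : Option Int := some (o.elim c (fun v => max v c))

theorem pvGetFoldlStepA (pairs : List (String × Int)) (d : PySem.Dict String Int) (k : String) :
    (pairs.foldl pvStepA d).get? k =
      ((pairs.filter (fun p => p.1 == k)).map (·.2)).foldl pvAcc (d.get? k) := by
  induction pairs generalizing d with
  | nil => rfl
  | cons p rest ih =>
    have hstep : (pvStepA d p).get? k =
        if p.1 == k then pvAcc (d.get? k) p.2 else d.get? k := by
      by_cases hk : p.1 = k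
      · subst hk
        rw [pvStepA, PySem.Dict.get?_insert]
        simp only [beq_self_eq_true, if_pos]
        rw [PySem.Dict.contains_eq_isSome_get?, PySem.Dict.getD_eq_get?_getD]
        cases d.get? p.1 <;> simp [pvAcc]
      · rw [pvStepA, PySem.Dict.get?_insert]
        simp [hk, Ne.symm hk]
    simp only [List.foldl_cons, List.filter_cons]
    by_cases hk : p.1 = k
    · simp only [beq_self_eq_true, if_pos, List.map_cons, List.foldl_cons, ih,
        hstep, hk]
    · have hbk : (p.1 == k) = false := by simp [hk]
      simp only [hbk, Bool.false_eq_true, ih, hstep]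
      simp

theorem pvAccSome (l : List Int) (v : Int) : l.foldl pvAcc (some v) = some (l.foldl max v) := by
  induction l generalizing v with
  | nil => rfl
  | cons c rest ih => simp [pvAcc, ih]

theorem pvAccNone (l : List Int) (h : l ≠ []) : l.foldl pvAcc none = some (pyMaxList l) := by
  cases l with
  | nil => exact absurd rfl h
  | cons c rest => simp [pvAcc, pvAccSome, pyMaxList]

-- ===== VERDICT (by name: the statement is the Claim_ definition above) =====
theorem build_max_tf_by_doc_dict_spec : Claim_equal_build_max_tf_by_doc_dict := by
  intro ii _
  unfold Spec_build_max_tf_by_doc_dict build_max_tf_by_doc_dict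
  dsimp only [build_max_tf_by_doc_dict_alt]
  rw [pvStepA_eq, pvFoldlFlatMap, pvFoldlFlatMap]
  set pairs := ii.flatMap (·.2) with hpairs
  set dA := pairs.foldl pvStepA PySem.Dict.empty with hdA
  set g := pairs.foldl (fun g dc => g.modify dc.1 [] (· ++ [dc.2])) PySem.Dict.empty with hg
  have hkeysA : dA.keys = PySem.Set.ofList (pairs.map (·.1)) := by
    rw [hdA]
    rw [show pvStepA = (fun (m : PySem.Dict String Int) (dc : String × Int) =>
      m.insert dc.1 (if m.contains dc.1 then max (m.getD dc.1 0) dc.2 else dc.2)) from rfl]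
    rw [PySem.Dict.keys_foldl_insert_key]
    simp [PySem.Dict.keys_empty, PySem.Set.update_nil_left]
  have hndA : dA.keys.Nodup := by
    rw [hkeysA]; exact PySem.Set.nodup_ofList _
  have hkeysG : g.keys = PySem.Set.ofList (pairs.map (·.1)) := by
    rw [hg]
    rw [PySem.Dict.keys_foldl_modify_key]
    simp [PySem.Dict.keys_empty, PySem.Set.update_nil_left]
  have hndG : g.keys.Nodup := by
    rw [hkeysG]; exact PySem.Set.nodup_ofList _
  have hgetG : ∀ k, g.getD k [] = (pairs.filter (fun p => p.1 == k)).map (·.2) := by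
    intro k
    rw [hg, PySem.Dict.getD_foldl_modify_append, PySem.Dict.getD_empty]
    simp
  rw [PySem.Dict.items_eq_map_keys dA hndA 0, PySem.Dict.items_eq_map_keys g hndG []]
  rw [hkeysA, hkeysG, List.map_map]
  apply List.map_congr_left
  intro k hk
  have hkmem : k ∈ pairs.map (·.1) := (PySem.Set.mem_ofList _ _).mp hk
  have hne : (pairs.filter (fun p => p.1 == k)).map (·.2) ≠ [] := by
    obtain ⟨p, hp, hpk⟩ := List.mem_map.mp hkmem
    simp only [ne_eq, List.map_eq_nil_iff, List.filter_eq_nil_iff, not_forall]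
    exact ⟨p, hp, by simp [hpk]⟩
  have : dA.getD k 0 = pyMaxList ((pairs.filter (fun p => p.1 == k)).map (·.2)) := by
    rw [PySem.Dict.getD_eq_get?_getD, hdA, pvGetFoldlStepA, PySem.Dict.get?_empty,
      pvAccNone _ hne]
    rfl
  simp only [Function.comp, this, hgetG k]
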